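-- pv_equiv track=rewrite | github.com/DevArchitectMaster/reinforcement_learning_ev3_framework_student | robot/ev3/main_robot_micpy.py | preprocessing_observations
-- ===== SOURCE A (Python) =====
-- def preprocessing_observations(observations):
--     __car_size = 24 #cm
--     __obs_discrete = []
--
--     for __observation in observations:
--         if(__observation < (__car_size * 1.8)):
--             __value = 1 # obstacle detected
--             if(__observation < (__car_size * 0.6)):
--                 __value = 0 # close obstacle detected
--         else:
--             __value = 2
--         __obs_discrete.append(__value)
--
--     return __obs_discrete
-- ===== SOURCE B (Python) =====
-- def preprocessing_observations(observations):
--     # Sorted threshold table + binary search (hand-rolled bisect_right):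
--     # the bin index is where the observation would be inserted among the thresholds.
--     thresholds = [24 * 0.6, 24 * 1.8]
--
--     def bisect_right(x):
--         lo, hi = 0, len(thresholds)
--         while lo < hi:
--             mid = (lo + hi) // 2
--             if x < thresholds[mid]:
--                 hi = mid
--             else:
--                 lo = mid + 1
--         return lo
--
--     out = []
--     for o in observations:
--         out.append(bisect_right(o))
--     return out
-- ===== Notes on version B (the rewrite author's own statement) =====
-- stated objective: alternative
-- what changed: Replaces the hard-coded nested if/else classification with a sorted threshold table queried by a hand-rolled bisect_right binary search; the bin is the insertion point of the observation among the thresholds.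
import Mathlib
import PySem

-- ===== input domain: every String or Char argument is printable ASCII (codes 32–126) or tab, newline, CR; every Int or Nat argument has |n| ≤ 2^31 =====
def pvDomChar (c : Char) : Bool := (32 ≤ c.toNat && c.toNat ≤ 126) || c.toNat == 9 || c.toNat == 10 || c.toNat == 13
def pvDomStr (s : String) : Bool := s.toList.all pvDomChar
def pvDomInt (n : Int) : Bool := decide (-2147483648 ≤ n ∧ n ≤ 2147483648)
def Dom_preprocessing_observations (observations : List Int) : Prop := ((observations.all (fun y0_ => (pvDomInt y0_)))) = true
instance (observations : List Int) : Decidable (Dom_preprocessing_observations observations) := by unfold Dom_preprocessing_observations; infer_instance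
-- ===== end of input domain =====

-- B replaces the nested if/else classification with a sorted threshold table queried by a
-- hand-rolled bisect_right binary search (objective: alternative structure, same cost).

-- ===== PORT A =====
-- Port of A. Float thresholds 24*1.8 = 43.2 and 24*0.6 = 14.4 are compared against Int
-- observations; since both floats lie strictly between consecutive integers, the comparison
-- o < 43.2 (resp. o < 14.4) is exact for integer o and is ported as o*5 < 216 (resp. o*5 < 72).
def preprocessing_observations (observations : List Int) : List Int :=
  observations.foldl (fun obs_discrete observation =>
    obs_discrete ++ [if observation * 5 < 216 then
                       (if observation * 5 < 72 then (0 : Int) else 1)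
                     else 2]) []

-- ===== PORT B =====
-- B-side helper: the hand-rolled bisect_right while-loop, as recursion on hi - lo.
-- Float thresholds [14.4, 43.2] ported exactly for integer x as the scaled table [72, 216]
-- compared against x*5 (same exact-comparison argument as for port A).
def pvBisectGo (thresholds : List Int) (x : Int) (lo hi : Nat) : Nat :=
  if _h : lo < hi then
    let mid := (lo + hi) / 2
    if x * 5 < thresholds.getD mid 0 then pvBisectGo thresholds x lo mid
    else pvBisectGo thresholds x (mid + 1) hi
  else lo
termination_by hi - lo
decreasing_by all_goals omega

def preprocessing_observations_alt (observations : List Int) : List Int :=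
  observations.foldl (fun out o =>
    out ++ [(pvBisectGo [72, 216] o 0 2 : Int)]) []

-- ===== PRECONDITION & SPEC =====
def Spec_preprocessing_observations (observations : List Int) (out : List Int) : Prop := out = preprocessing_observations_alt observations
instance (observations : List Int) (out : List Int) : Decidable (Spec_preprocessing_observations observations out) := by unfold Spec_preprocessing_observations; infer_instance

-- ===== CLAIM =====
def Claim_equal_preprocessing_observations : Prop := ∀ (observations : List Int), Dom_preprocessing_observations observations → Spec_preprocessing_observations observations (preprocessing_observations observations)

-- ===== LEMMAS AND PROOFS =====
theorem pv_foldl_append_map (l : List Int) (f : Int → Int) (acc : List Int) :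
    l.foldl (fun a o => a ++ [f o]) acc = acc ++ l.map f := by
  induction l generalizing acc with
  | nil => simp
  | cons x xs ih => simp [List.foldl, ih]

-- The binary search over the concrete table [72, 216] computes A's nested if/else bin.
theorem pv_bisect_eq (o : Int) :
    (pvBisectGo [72, 216] o 0 2 : Int)
      = if o * 5 < 216 then (if o * 5 < 72 then (0 : Int) else 1) else 2 := by
  by_cases h1 : o * 5 < 216 <;> by_cases h2 : o * 5 < 72 <;>
    simp [pvBisectGo, h1, h2]

-- ===== VERDICT =====
theorem preprocessing_observations_spec : Claim_equal_preprocessing_observations := by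
  intro observations _
  unfold Spec_preprocessing_observations preprocessing_observations preprocessing_observations_alt
  rw [pv_foldl_append_map, pv_foldl_append_map]
  simp only [List.nil_append]
  apply List.map_congr_left
  intro o _
  rw [pv_bisect_eq]
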